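-- pv_equiv track=rewrite | github.com/korung3195/algorithm_study | programmers/60059.py | check
-- ===== SOURCE A (Python) =====
-- def check(key, lock, m, n, i, j, count):
--     for x in range(m):
--         for y in range(m):
--             if key[x][y] + lock[i+x][j+y] > 1:
--                 return False
--             if m-1<=i+x<m+n-1 and m-1<=j+y<m+n-1 and key[x][y] == 1 and lock[i+x][j+y] == 0:
--                 count -= 1
--     return count == 0
-- ===== SOURCE B (Python) =====
-- def check(key, lock, m, n, i, j, count):
--     # Histogram approach: one aggregation pass builds a hash tally of the
--     # distinct (key value, lock value, in-valid-region) triples occurring in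
--     # the overlap window; collision and hole-fill are then decided over the
--     # few distinct buckets instead of cell by cell with early return.
--     tally = {}
--     for x in range(m):
--         for y in range(m):
--             t = (key[x][y], lock[i + x][j + y],
--                  m - 1 <= i + x < m + n - 1 and m - 1 <= j + y < m + n - 1)
--             tally[t] = tally.get(t, 0) + 1
--     if any(k + l > 1 for (k, l, _) in tally):
--         return False
--     filled = sum(c for (k, l, r), c in tally.items() if r and k == 1 and l == 0)
--     return count == filled
-- ===== Notes on version B (the rewrite author's own statement) =====
-- stated objective: alternative
-- what changed: B aggregates the overlap window in one pass into a hash histogram keyed by the distinct (key value, lock value, in-region) triples, then decides collision and compares count with the summed filled-hole buckets, instead of A's cell-by-cell scan with early return and a decremented counter.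
-- outside the precondition, e.g. on check([[1, 0], [0, 0]], [[1]], 2, 1, 0, 0, 0): A returns False, B raises IndexError
import Mathlib
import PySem

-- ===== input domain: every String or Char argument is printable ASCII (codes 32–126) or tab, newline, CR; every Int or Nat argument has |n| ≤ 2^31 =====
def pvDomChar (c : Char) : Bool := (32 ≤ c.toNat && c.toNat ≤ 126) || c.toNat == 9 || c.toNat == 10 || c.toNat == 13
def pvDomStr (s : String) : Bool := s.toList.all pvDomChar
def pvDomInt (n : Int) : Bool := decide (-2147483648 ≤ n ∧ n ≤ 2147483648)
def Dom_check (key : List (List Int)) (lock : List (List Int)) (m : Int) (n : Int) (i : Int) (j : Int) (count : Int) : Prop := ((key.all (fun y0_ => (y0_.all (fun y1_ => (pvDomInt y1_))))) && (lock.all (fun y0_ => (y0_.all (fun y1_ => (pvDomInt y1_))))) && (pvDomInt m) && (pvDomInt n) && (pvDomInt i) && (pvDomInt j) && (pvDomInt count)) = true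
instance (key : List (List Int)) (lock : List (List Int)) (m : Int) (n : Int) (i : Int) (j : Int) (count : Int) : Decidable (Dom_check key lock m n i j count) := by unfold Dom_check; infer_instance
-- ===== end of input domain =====

-- B replaces A's early-return cell-by-cell scan with a decremented counter by one aggregation
-- pass into a hash histogram of distinct (key,lock,in-region) triples, decided afterwards.


-- ===== PORT A =====
-- Inner 'for y in range(m)' loop; result: none = IndexError, some none = 'return False',
-- some (some c) = loop finished with count c.
def innerA (key lock : List (List Int)) (m n i j x : Int) : List Int → Int → Option (Option Int)
  | [], count => some (some count)
  | y :: rest, count =>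
    match (PySem.List.pyGet? key x).bind (fun r => PySem.List.pyGet? r y),
          (PySem.List.pyGet? lock (i + x)).bind (fun r => PySem.List.pyGet? r (j + y)) with
    | some k, some l =>
      if k + l > 1 then some none
      else innerA key lock m n i j x rest
        (if m - 1 ≤ i + x ∧ i + x < m + n - 1 ∧ m - 1 ≤ j + y ∧ j + y < m + n - 1 ∧ k = 1 ∧ l = 0
         then count - 1 else count)
    | _, _ => none   -- IndexError (excluded by Pre_check)

-- Outer 'for x in range(m)' loop.
def outerA (key lock : List (List Int)) (m n i j : Int) : List Int → Int → Option (Option Int)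
  | [], count => some (some count)
  | x :: rest, count =>
    match innerA key lock m n i j x (PySem.List.pyRange 0 m 1) count with
    | some (some c) => outerA key lock m n i j rest c
    | r => r

def check (key : List (List Int)) (lock : List (List Int)) (m : Int) (n : Int) (i : Int) (j : Int) (count : Int) : Bool :=
  match outerA key lock m n i j (PySem.List.pyRange 0 m 1) count with
  | some (some c) => decide (c = 0)   -- 'return count == 0'
  | some none => false                -- early 'return False'
  | none => false                     -- IndexError (excluded by Pre_check)

-- ===== PORT B =====
-- The triple (key[x][y], lock[i+x][j+y], in-valid-region) for one cell; none = IndexError.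
def tripleB (key lock : List (List Int)) (m n i j x y : Int) : Option (Int × Int × Bool) :=
  match (PySem.List.pyGet? key x).bind (fun r => PySem.List.pyGet? r y),
        (PySem.List.pyGet? lock (i + x)).bind (fun r => PySem.List.pyGet? r (j + y)) with
  | some k, some l =>
    some (k, l, decide (m - 1 ≤ i + x ∧ i + x < m + n - 1 ∧ m - 1 ≤ j + y ∧ j + y < m + n - 1))
  | _, _ => none

-- 'tally[t] = tally.get(t, 0) + 1'
def stepB (d : PySem.Dict (Int × Int × Bool) Int) (t : Int × Int × Bool) : PySem.Dict (Int × Int × Bool) Int :=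
  d.insert t (d.getD t 0 + 1)

-- The nested aggregation loop building the histogram.
def buildB (key lock : List (List Int)) (m n i j : Int) : Option (PySem.Dict (Int × Int × Bool) Int) :=
  (PySem.List.pyRange 0 m 1).foldlM (fun d x =>
    (PySem.List.pyRange 0 m 1).foldlM (fun d y =>
      (tripleB key lock m n i j x y).map (stepB d)) d)
    PySem.Dict.empty

def collT (t : Int × Int × Bool) : Bool := decide (t.1 + t.2.1 > 1)

def fillT (t : Int × Int × Bool) : Bool := t.2.2 && decide (t.1 = 1) && decide (t.2.1 = 0)

def check_alt (key : List (List Int)) (lock : List (List Int)) (m : Int) (n : Int) (i : Int) (j : Int) (count : Int) : Bool :=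
  match buildB key lock m n i j with
  | none => false   -- IndexError (excluded by Pre_check)
  | some tally =>
    if tally.keys.any collT then false   -- 'any(k + l > 1 for (k, l, _) in tally)'
    else decide (count = ((tally.items.filter (fun p => fillT p.1)).map (fun p => p.2)).sum)

-- ===== PRECONDITION & SPEC =====
-- Pre_check: every cell the loops visit is a valid Python index (key[x][y] and lock[i+x][j+y]
-- exist, possibly via negative-index wraparound). It excludes inputs where some visited index is
-- out of range: there A either raises IndexError or happens to 'return False' early before
-- reaching the bad cell, while B (which aggregates all cells first) raises.
def Pre_check (key : List (List Int)) (lock : List (List Int)) (m : Int) (n : Int) (i : Int) (j : Int) (count : Int) : Prop :=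
  (0 < m → m ≤ (key.length : Int)) ∧
  ∀ x ∈ PySem.List.pyRange 0 (min m (key.length : Int)) 1,
    (PySem.List.pyGet? key x).isSome = true ∧
    m ≤ (((PySem.List.pyGet? key x).getD []).length : Int) ∧
    (PySem.List.pyGet? lock (i + x)).isSome = true ∧
    -((((PySem.List.pyGet? lock (i + x)).getD []).length : Int)) ≤ j ∧
    j + m ≤ (((PySem.List.pyGet? lock (i + x)).getD []).length : Int)
instance (key : List (List Int)) (lock : List (List Int)) (m : Int) (n : Int) (i : Int) (j : Int) (count : Int) : Decidable (Pre_check key lock m n i j count) := by unfold Pre_check; infer_instance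

def pvWitness_check : List (List Int) × List (List Int) × Int × Int × Int × Int × Int :=
  ([[1]], [[0]], 1, 1, 0, 0, 1)

def Spec_check (key : List (List Int)) (lock : List (List Int)) (m : Int) (n : Int) (i : Int) (j : Int) (count : Int) (out : Bool) : Prop := out = check_alt key lock m n i j count
instance (key : List (List Int)) (lock : List (List Int)) (m : Int) (n : Int) (i : Int) (j : Int) (count : Int) (out : Bool) : Decidable (Spec_check key lock m n i j count out) := by unfold Spec_check; infer_instance

-- ===== CLAIM (what is proved, stated in full; the proofs are below) =====
def Claim_equal_check : Prop := ∀ (key : List (List Int)) (lock : List (List Int)) (m : Int) (n : Int) (i : Int) (j : Int) (count : Int), Dom_check key lock m n i j count → Pre_check key lock m n i j count → Spec_check key lock m n i j count (check key lock m n i j count)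

-- ===== LEMMAS AND PROOFS =====

theorem mapM_isSome_of_all {α β : Type} (f : α → Option β) :
    ∀ (l : List α), (∀ a ∈ l, (f a).isSome) → ∃ r, l.mapM f = some r := by
  intro l
  induction l with
  | nil => intro _; exact ⟨[], rfl⟩
  | cons a t ih =>
    intro h
    obtain ⟨b, hb⟩ := Option.isSome_iff_exists.mp (h a (List.mem_cons_self))
    obtain ⟨r, hr⟩ := ih (fun a ha => h a (List.mem_cons_of_mem _ ha))
    exact ⟨b :: r, by simp [List.mapM_cons, hb, hr]⟩

-- A's inner loop computes 'collision or count minus filled' of the row's triple list.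
theorem inner_eq (key lock : List (List Int)) (m n i j x : Int) :
    ∀ (ys : List Int) (count : Int) (ts : List (Int × Int × Bool)),
      ys.mapM (fun y => tripleB key lock m n i j x y) = some ts →
      innerA key lock m n i j x ys count =
        some (if ts.any collT then none
              else some (count - ((ts.filter fillT).length : Int))) := by
  intro ys
  induction ys with
  | nil =>
    intro count ts hts
    simp [List.mapM_nil] at hts
    subst hts
    simp [innerA]
  | cons y rest ih =>
    intro count ts hts
    rw [List.mapM_cons] at hts
    cases hc : tripleB key lock m n i j x y with
    | none => simp [hc] at hts
    | some t =>
      cases hr : rest.mapM (fun y => tripleB key lock m n i j x y) with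
      | none => simp [hc, hr] at hts
      | some ts' =>
        simp [hc, hr] at hts
        cases h1 : (PySem.List.pyGet? key x).bind (fun r => PySem.List.pyGet? r y) with
        | none => simp [tripleB, h1] at hc
        | some k =>
          cases h2 : (PySem.List.pyGet? lock (i + x)).bind (fun r => PySem.List.pyGet? r (j + y)) with
          | none => simp [tripleB, h1, h2] at hc
          | some l =>
            simp only [tripleB, h1, h2, Option.some.injEq] at hc
            subst hc
            rw [innerA]
            simp only [h1, h2]
            by_cases hcol : k + l > 1
            · simp [← hts, hcol, List.any_cons, collT]
            · rw [if_neg hcol, ih _ _ hr, ← hts]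
              by_cases hC : (m - 1 ≤ i + x ∧ i + x < m + n - 1 ∧ m - 1 ≤ j + y ∧ j + y < m + n - 1)
              · rw [decide_eq_true hC]
                have hct : collT (k, l, true) = false := by simp [collT]; omega
                by_cases hkl : k = 1 ∧ l = 0
                · have hcond : m - 1 ≤ i + x ∧ i + x < m + n - 1 ∧ m - 1 ≤ j + y ∧ j + y < m + n - 1 ∧ k = 1 ∧ l = 0 :=
                    ⟨hC.1, hC.2.1, hC.2.2.1, hC.2.2.2, hkl.1, hkl.2⟩
                  rw [if_pos hcond]
                  have hf : fillT (k, l, true) = true := by simp [fillT, hkl.1, hkl.2]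
                  simp only [List.any_cons, hct, Bool.false_or, List.filter_cons, hf, if_true,
                    List.length_cons]
                  by_cases hA : ts'.any collT
                  · simp [hA]
                  · simp only [hA, Bool.false_eq_true, if_false, Option.some.injEq]
                    push_cast
                    omega
                · have hcond : ¬(m - 1 ≤ i + x ∧ i + x < m + n - 1 ∧ m - 1 ≤ j + y ∧ j + y < m + n - 1 ∧ k = 1 ∧ l = 0) :=
                    fun h => hkl ⟨h.2.2.2.2.1, h.2.2.2.2.2⟩
                  rw [if_neg hcond]
                  have hf : fillT (k, l, true) = false := by
                    simp only [fillT, Bool.and_eq_false_iff, decide_eq_false_iff_not]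
                    by_cases h1' : k = 1
                    · exact Or.inr (fun h0 => hkl ⟨h1', h0⟩)
                    · exact Or.inl (Or.inr h1')
                  simp only [List.any_cons, hct, Bool.false_or, List.filter_cons, hf,
                    Bool.false_eq_true, if_false]
              · rw [decide_eq_false hC]
                have hct : collT (k, l, false) = false := by simp [collT]; omega
                have hcond : ¬(m - 1 ≤ i + x ∧ i + x < m + n - 1 ∧ m - 1 ≤ j + y ∧ j + y < m + n - 1 ∧ k = 1 ∧ l = 0) :=
                  fun h => hC ⟨h.1, h.2.1, h.2.2.1, h.2.2.2.1⟩
                rw [if_neg hcond]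
                have hf : fillT (k, l, false) = false := by simp [fillT]
                simp only [List.any_cons, hct, Bool.false_or, List.filter_cons, hf,
                  Bool.false_eq_true, if_false]

-- A's outer loop on the flattened triple lists.
theorem outer_eq (key lock : List (List Int)) (m n i j : Int) :
    ∀ (xs : List Int) (count : Int) (pss : List (List (Int × Int × Bool))),
      xs.mapM (fun x => (PySem.List.pyRange 0 m 1).mapM (fun y => tripleB key lock m n i j x y)) = some pss →
      outerA key lock m n i j xs count =
        some (if pss.flatten.any collT then none
              else some (count - ((pss.flatten.filter fillT).length : Int))) := by
  intro xs
  induction xs with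
  | nil =>
    intro count pss hpss
    simp [List.mapM_nil] at hpss
    subst hpss
    simp [outerA]
  | cons x rest ih =>
    intro count pss hpss
    rw [List.mapM_cons] at hpss
    cases hc : (PySem.List.pyRange 0 m 1).mapM (fun y => tripleB key lock m n i j x y) with
    | none => simp [hc] at hpss
    | some ts =>
      cases hr : rest.mapM (fun x => (PySem.List.pyRange 0 m 1).mapM (fun y => tripleB key lock m n i j x y)) with
      | none => simp [hc, hr] at hpss
      | some pss' =>
        simp [hc, hr] at hpss
        rw [outerA, inner_eq key lock m n i j x _ count ts hc, ← hpss]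
        by_cases hany : ts.any collT
        · simp [hany]
        · rw [if_neg (by simp [hany])]
          show outerA key lock m n i j rest (count - ((ts.filter fillT).length : Int)) = _
          rw [ih _ _ hr]
          simp only [List.flatten_cons, List.any_append, List.filter_append, List.length_append]
          by_cases hany2 : pss'.flatten.any collT
          · simp [hany, hany2]
          · simp only [hany, hany2, Bool.false_eq_true, Bool.or_self, if_false]
            congr 2
            push_cast
            ring

-- Under Pre_, every visited triple exists.
theorem cells_some (key lock : List (List Int)) (m n i j count : Int)
    (hpre : Pre_check key lock m n i j count) :
    ∃ pss, (PySem.List.pyRange 0 m 1).mapM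
      (fun x => (PySem.List.pyRange 0 m 1).mapM (fun y => tripleB key lock m n i j x y)) = some pss := by
  obtain ⟨hmlen, hall⟩ := hpre
  apply mapM_isSome_of_all
  intro x hx
  have hxm := (PySem.List.mem_pyRange_one).mp hx
  have hmin : min m (key.length : Int) = m := by
    have := hmlen (by omega)
    omega
  rw [hmin] at hall
  obtain ⟨hk, hkl, hl, hj1, hj2⟩ := hall x hx
  obtain ⟨rk, hrk⟩ := Option.isSome_iff_exists.mp hk
  obtain ⟨rl, hrl⟩ := Option.isSome_iff_exists.mp hl
  rw [hrk] at hkl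
  rw [hrl] at hj1 hj2
  simp only [Option.getD_some] at hkl hj1 hj2
  obtain ⟨ts, hts⟩ : ∃ ts, (PySem.List.pyRange 0 m 1).mapM (fun y => tripleB key lock m n i j x y) = some ts := by
    apply mapM_isSome_of_all
    intro y hy
    have hym := (PySem.List.mem_pyRange_one).mp hy
    have h2 : (PySem.List.pyGet? rk y).isSome := by
      cases h : PySem.List.pyGet? rk y
      · rw [PySem.List.pyGet?_eq_none_iff] at h
        exact absurd (by unfold PySem.Raise.InRange; omega) h
      · rfl
    have h4 : (PySem.List.pyGet? rl (j + y)).isSome := by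
      cases h : PySem.List.pyGet? rl (j + y)
      · rw [PySem.List.pyGet?_eq_none_iff] at h
        exact absurd (by unfold PySem.Raise.InRange; omega) h
      · rfl
    obtain ⟨k, hk2⟩ := Option.isSome_iff_exists.mp h2
    obtain ⟨l, hl4⟩ := Option.isSome_iff_exists.mp h4
    simp [tripleB, hrk, hrl, hk2, hl4]
  simp [hts]

-- B's inner foldlM over a row whose triples all exist is a plain foldl.
theorem foldlM_row_eq {α β σ : Type} (g : α → Option β) (st : σ → β → σ) :
    ∀ (l : List α) (ts : List β) (s : σ), l.mapM g = some ts →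
      l.foldlM (fun s a => (g a).map (st s)) s = some (ts.foldl st s) := by
  intro l
  induction l with
  | nil =>
    intro ts s h
    simp [List.mapM_nil] at h
    subst h
    rfl
  | cons a rest ih =>
    intro ts s h
    rw [List.mapM_cons] at h
    cases hg : g a with
    | none => simp [hg] at h
    | some b =>
      cases hr : rest.mapM g with
      | none => simp [hg, hr] at h
      | some ts' =>
        simp [hg, hr] at h
        subst h
        simp only [List.foldlM_cons, hg, Option.map_some, Option.bind_some, List.foldl_cons]
        exact ih ts' (st s b) hr

-- B's outer foldlM is a plain foldl over the flattened triples.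
theorem foldlM_build_eq (key lock : List (List Int)) (m n i j : Int) :
    ∀ (xs : List Int) (pss : List (List (Int × Int × Bool))) (d : PySem.Dict (Int × Int × Bool) Int),
      xs.mapM (fun x => (PySem.List.pyRange 0 m 1).mapM (fun y => tripleB key lock m n i j x y)) = some pss →
      xs.foldlM (fun d x => (PySem.List.pyRange 0 m 1).foldlM (fun d y =>
          (tripleB key lock m n i j x y).map (stepB d)) d) d = some (pss.flatten.foldl stepB d) := by
  intro xs
  induction xs with
  | nil =>
    intro pss d h
    simp [List.mapM_nil] at h
    subst h
    rfl
  | cons x rest ih =>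
    intro pss d h
    rw [List.mapM_cons] at h
    cases hc : (PySem.List.pyRange 0 m 1).mapM (fun y => tripleB key lock m n i j x y) with
    | none => simp [hc] at h
    | some ts =>
      cases hr : rest.mapM (fun x => (PySem.List.pyRange 0 m 1).mapM (fun y => tripleB key lock m n i j x y)) with
      | none => simp [hc, hr] at h
      | some pss' =>
        simp [hc, hr] at h
        subst h
        simp only [List.foldlM_cons]
        rw [foldlM_row_eq _ _ _ ts d hc]
        simp only [Option.bind_eq_bind, Option.bind_some]
        rw [ih pss' _ hr]
        simp [List.foldl_append]

-- any over the deduplicated key set = any over the raw list.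
theorem any_ofList {α : Type} [BEq α] [LawfulBEq α] (p : α → Bool) (l : List α) :
    (PySem.Set.ofList l).any p = l.any p := by
  apply Bool.eq_iff_iff.mpr
  rw [List.any_eq_true, List.any_eq_true]
  constructor
  · rintro ⟨a, ha, hp⟩; exact ⟨a, (PySem.Set.mem_ofList l a).mp ha, hp⟩
  · rintro ⟨a, ha, hp⟩; exact ⟨a, (PySem.Set.mem_ofList l a).mpr ha, hp⟩

-- sum of an indicator = count.
theorem sum_indicator {α : Type} [BEq α] [LawfulBEq α] (t : α) :
    ∀ (l : List α), (l.map (fun k => if t == k then (1 : Nat) else 0)).sum = l.count t := by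
  intro l
  induction l with
  | nil => simp
  | cons a rest ih =>
    simp only [List.map_cons, List.sum_cons, List.count_cons, ih, beq_iff_eq]
    by_cases h : t = a
    · simp [h]; omega
    · simp [h]
      exact fun hh => h hh.symm

-- summing multiplicities over any nodup superset of the matching elements counts the filter.
theorem sum_counts {α : Type} [BEq α] [LawfulBEq α] (p : α → Bool) :
    ∀ (l s : List α), s.Nodup → (∀ t, t ∈ l → p t = true → t ∈ s) →
      ((s.filter p).map (fun k => l.count k)).sum = (l.filter p).length := by
  intro l
  induction l with
  | nil => intro s _ _; simp
  | cons a rest ih =>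
    intro s hnd hmem
    have hsplit : ((s.filter p).map (fun k => (a :: rest).count k)).sum
        = ((s.filter p).map (fun k => rest.count k)).sum
          + ((s.filter p).map (fun k => if a == k then (1 : Nat) else 0)).sum := by
      rw [← List.sum_map_add]
      apply congrArg
      apply List.map_congr_left
      intro k _
      rw [List.count_cons]
    rw [hsplit, ih s hnd (fun t ht hp => hmem t (List.mem_cons_of_mem _ ht) hp),
        sum_indicator]
    by_cases hp : p a = true
    · have hmema : a ∈ s.filter p := List.mem_filter.mpr ⟨hmem a List.mem_cons_self hp, hp⟩
      rw [List.count_eq_one_of_mem (hnd.filter p) hmema]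
      simp [List.filter_cons, hp]
    · have hnmem : a ∉ s.filter p := fun hc => hp (List.mem_filter.mp hc).2
      rw [List.count_eq_zero_of_not_mem hnmem]
      simp [List.filter_cons, hp]

-- cast of a Nat-valued sum.
theorem sum_map_cast {α : Type} (f : α → Nat) :
    ∀ (l : List α), (l.map (fun k => (f k : Int))).sum = ((l.map f).sum : Nat) := by
  intro l
  induction l with
  | nil => simp
  | cons a rest ih => simp [ih]

-- ===== VERDICT (by name: the statement is the Claim_ definition above) =====
theorem check_spec : Claim_equal_check := by
  intro key lock m n i j count _ hpre
  unfold Spec_check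
  obtain ⟨pss, hpss⟩ := cells_some key lock m n i j count hpre
  unfold check check_alt buildB
  rw [outer_eq key lock m n i j _ count pss hpss,
      foldlM_build_eq key lock m n i j _ pss PySem.Dict.empty hpss]
  have hcounter : pss.flatten.foldl stepB PySem.Dict.empty = PySem.Dict.counter pss.flatten := by
    rw [← PySem.Dict.foldl_insert_getD_add_one_eq_counter]
    rfl
  rw [hcounter]
  by_cases hany : pss.flatten.any collT
  · simp [hany, PySem.Dict.keys_counter, any_ofList]
  · have hsum : ((((PySem.Dict.counter pss.flatten).items.filter (fun p => fillT p.1)).map (fun p => p.2)).sum)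
        = ((pss.flatten.filter fillT).length : Int) := by
      rw [PySem.Dict.items_counter, List.filter_map]
      have hcomp : ((fun p : (Int × Int × Bool) × Int => fillT p.1) ∘
          (fun k => (k, (pss.flatten.count k : Int)))) = fillT := by
        funext k; rfl
      rw [hcomp, List.map_map]
      have hcomp2 : ((fun p : (Int × Int × Bool) × Int => p.2) ∘
          (fun k => (k, (pss.flatten.count k : Int)))) = (fun k => (pss.flatten.count k : Int)) := by
        funext k; rfl
      rw [hcomp2, sum_map_cast, sum_counts fillT pss.flatten (PySem.Set.ofList pss.flatten)
            (PySem.Set.nodup_ofList _) (fun t ht _ => (PySem.Set.mem_ofList _ _).mpr ht)]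
    simp only [hany, Bool.false_eq_true, if_false]
    simp [PySem.Dict.keys_counter, any_ofList, hany, hsum]
    omega
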